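-- pv_equiv track=rewrite | github.com/porfinogeneta/Studia-UWr | Modele-Jezykowe/lista1/z2/determine_if_common.py | generate_sentences_permutations
-- ===== SOURCE A (Python) =====
-- from typing import List
--
-- def generate_sentences_permutations(words: List[str]) -> str:
--     """
--         for a given list of words, generates all permutations
--         of a sentence, returnes list of possiblr permutations
--     """
--
--     def permute(words):
--         if words == []:
--             return [[]]
--
--         perms = permute(words[1:])
--         res = []
--
--         for p in perms:
--             for i in range(0, len(p) + 1):
--                 l_cpy = list(p)
--                 l_cpy.insert(i, words[0])
--                 res.append(l_cpy)
--
--         return res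
--
--     sentences_words_lst = permute(words)
--
--     # prepare sentences, capitalize first word, add . at the end
--     sntsc = [" ".join([w.capitalize() if i == 0 else (w + "." if i == len(sen) - 1 else w) for i, w in enumerate(sen)]) for sen in sentences_words_lst]
--
--     return sntsc
-- ===== SOURCE B (Python) =====
-- from typing import List
--
-- def generate_sentences_permutations(words: List[str]) -> str:
--     # build all permutations iteratively: fold over the words in reverse,
--     # splicing each word into every position of every partial permutation
--     perms = [[]]
--     for w in reversed(words):
--         perms = [p[:i] + [w] + p[i:] for p in perms for i in range(len(p) + 1)]
--
--     sntsc = [" ".join([w.capitalize() if i == 0 else (w + "." if i == len(sen) - 1 else w) for i, w in enumerate(sen)]) for sen in perms]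
--     return sntsc
-- ===== Notes on version B (the rewrite author's own statement) =====
-- stated objective: alternative
-- what changed: The recursive permute helper (with per-position list.insert on copies inside a foldl over recursive results) is replaced by an iterative builder that folds over the words in reverse, splicing each word into every slice position of every partial permutation via a comprehension; the formatting comprehension is unchanged.
import Mathlib
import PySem

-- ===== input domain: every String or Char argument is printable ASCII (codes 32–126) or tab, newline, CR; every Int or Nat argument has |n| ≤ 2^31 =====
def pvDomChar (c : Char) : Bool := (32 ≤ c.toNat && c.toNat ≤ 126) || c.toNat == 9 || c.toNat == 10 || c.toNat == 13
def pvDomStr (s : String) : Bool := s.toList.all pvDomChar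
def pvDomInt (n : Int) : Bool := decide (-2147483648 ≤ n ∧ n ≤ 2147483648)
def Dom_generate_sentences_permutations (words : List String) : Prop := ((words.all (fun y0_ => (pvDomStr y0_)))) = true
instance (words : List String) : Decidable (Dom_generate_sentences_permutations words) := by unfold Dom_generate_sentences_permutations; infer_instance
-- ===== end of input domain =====

-- B replaces A's recursive permutation helper by an iterative reverse-order builder using
-- slice-splicing comprehensions; the formatting comprehension is unchanged (objective: alternative).

-- shared primitive ports of Python built-ins:
-- str.capitalize(): exact on the ASCII domain (title-case = upper-case there), rest lower-cased
def pvCapitalize (s : String) : String :=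
  match s.toList with
  | [] => String.ofList []
  | c :: rest => String.ofList (PySem.Chars.upperChar c :: PySem.Chars.lower rest)

-- w + "." : string concatenation, exact (via the List Char representation)
def pvAddDot (s : String) : String := String.ofList (s.toList ++ ['.'])

-- the formatting comprehension (textually identical in A and in B, so shared):
-- " ".join([w.capitalize() if i == 0 else (w + "." if i == len(sen)-1 else w) for i, w in enumerate(sen)])
def pvFmt (sen : List String) : String :=
  PySem.Str.join " " ((PySem.List.enumerate sen).map (fun iw =>
    if iw.1 == 0 then pvCapitalize iw.2
    else if iw.1 == (sen.length : Int) - 1 then pvAddDot iw.2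
    else iw.2))

-- ===== PORT A =====
def pvPermute (ws : List String) : List (List String) :=
  match ws with
  | [] => [[]]
  | w :: rest =>
      (pvPermute rest).foldl (fun res p =>
        (PySem.List.pyRange 0 ((p.length : Int) + 1)).foldl
          (fun res i => res ++ [PySem.List.insert p i w]) res) []

def generate_sentences_permutations (words : List String) : List String :=
  (pvPermute words).map pvFmt

-- ===== PORT B =====
def pvPermsIter (words : List String) : List (List String) :=
  words.reverse.foldl
    (fun perms w =>
      perms.flatMap (fun p =>
        (List.range (p.length + 1)).map (fun i => p.take i ++ [w] ++ p.drop i)))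
    [[]]

def generate_sentences_permutations_alt (words : List String) : List String :=
  (pvPermsIter words).map pvFmt

-- ===== PRECONDITION & SPEC =====
def Spec_generate_sentences_permutations (words : List String) (out : List String) : Prop := out = generate_sentences_permutations_alt words
instance (words : List String) (out : List String) : Decidable (Spec_generate_sentences_permutations words out) := by unfold Spec_generate_sentences_permutations; infer_instance

-- ===== CLAIM (what is proved, stated in full; the proofs are below) =====
def Claim_equal_generate_sentences_permutations : Prop := ∀ (words : List String), Dom_generate_sentences_permutations words → Spec_generate_sentences_permutations words (generate_sentences_permutations words)

-- ===== LEMMAS AND PROOFS =====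

-- the one step of B's iterative builder
def pvStep (w : String) (perms : List (List String)) : List (List String) :=
  perms.flatMap (fun p =>
    (List.range (p.length + 1)).map (fun i => p.take i ++ [w] ++ p.drop i))

lemma pvPermute_eq_foldr (ws : List String) :
    pvPermute ws = ws.foldr pvStep [[]] := by
  induction ws with
  | nil => rfl
  | cons w rest ih =>
      rw [List.foldr_cons, ← ih]
      show (pvPermute rest).foldl _ [] = pvStep w (pvPermute rest)
      have hinner : ∀ (p : List String) (res : List (List String)),
          (PySem.List.pyRange 0 ((p.length : Int) + 1)).foldl
              (fun res i => res ++ [PySem.List.insert p i w]) res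
            = res ++ (List.range (p.length + 1)).map (fun i => p.take i ++ [w] ++ p.drop i) := by
        intro p res
        rw [PySem.List.foldl_append_singleton_eq_map]
        congr 1
        have hc : ((p.length : Int) + 1) = ((p.length + 1 : Nat) : Int) := by push_cast; ring
        rw [hc, PySem.List.pyRange_zero_natCast, List.map_map]
        refine List.map_congr_left ?_
        intro k hk
        simp only [Function.comp]
        rw [PySem.List.insert_natCast p k w (Nat.lt_succ_iff.mp (List.mem_range.mp hk))]
        simp
      simp only [hinner]
      rw [PySem.List.foldl_append_eq_flatMap]
      rfl

lemma pvPermsIter_eq (ws : List String) : pvPermsIter ws = pvPermute ws := by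
  unfold pvPermsIter
  rw [List.foldl_reverse, pvPermute_eq_foldr]
  rfl

-- ===== VERDICT (by name: the statement is the Claim_ definition above) =====
theorem generate_sentences_permutations_spec : Claim_equal_generate_sentences_permutations := by
  intro words _
  unfold Spec_generate_sentences_permutations
  unfold generate_sentences_permutations generate_sentences_permutations_alt
  rw [pvPermsIter_eq]
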